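-- pv_equiv track=rewrite | github.com/agrigaliunas/InfoGeneral | funcionesGenericas/digitosIguales.py | digitosIguales
-- ===== SOURCE A (Python) =====
-- def digitosIguales(num):
--     iguales = True
--     ultimoDig = num%10   # num = 1234
--     while num > 0:
--         if ultimoDig != num%10:
--             iguales = False
--         num = num//10
--     return iguales
-- ===== SOURCE B (Python) =====
-- def digitosIguales(num):
--     if num <= 0:
--         return True
--     k = 0
--     n = num
--     while n > 0:
--         k += 1
--         n //= 10
--     return num * 9 == (num % 10) * (10 ** k - 1)
-- ===== Notes on version B (the rewrite author's own statement) =====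
-- stated objective: alternative
-- what changed: B replaces the digit-by-digit comparison against a saved last digit by a closed-form repunit identity: it only counts the digits k and checks num*9 == (num%10)*(10**k - 1).
import Mathlib
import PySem

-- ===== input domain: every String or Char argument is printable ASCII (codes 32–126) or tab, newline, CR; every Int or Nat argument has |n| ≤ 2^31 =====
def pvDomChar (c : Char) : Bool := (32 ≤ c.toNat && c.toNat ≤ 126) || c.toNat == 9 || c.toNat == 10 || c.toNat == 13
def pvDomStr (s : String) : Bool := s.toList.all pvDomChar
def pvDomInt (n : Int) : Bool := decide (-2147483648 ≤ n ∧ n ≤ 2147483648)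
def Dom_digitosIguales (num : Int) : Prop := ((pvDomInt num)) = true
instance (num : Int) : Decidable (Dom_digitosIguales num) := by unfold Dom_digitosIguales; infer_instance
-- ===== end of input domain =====

-- B replaces A's digit-by-digit comparison against a saved last digit by a closed-form
-- repunit identity: count the digits k and check num*9 == (num%10)*(10^k - 1) (objective: alternative).

-- ===== PORT A =====
-- A's while loop, state (ultimoDig, num, iguales)
def digitosIgualesLoopA (ultimoDig : Int) (num : Int) (iguales : Bool) : Bool :=
  if 0 < num then
    digitosIgualesLoopA ultimoDig (PySem.Int.floordiv num 10)
      (if ultimoDig ≠ PySem.Int.mod num 10 then false else iguales)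
  else iguales
termination_by num.toNat
decreasing_by
  rw [PySem.Int.floordiv_eq_ediv_of_pos (by norm_num)]
  omega

def digitosIguales (num : Int) : Bool :=
  digitosIgualesLoopA (PySem.Int.mod num 10) num true

-- ===== PORT B =====
-- B's counting loop: `while n > 0: k += 1; n //= 10`, accumulator k
def digitosIgualesCountB (n : Int) (k : Int) : Int :=
  if 0 < n then digitosIgualesCountB (PySem.Int.floordiv n 10) (k + 1) else k
termination_by n.toNat
decreasing_by
  rw [PySem.Int.floordiv_eq_ediv_of_pos (by norm_num)]
  omega

-- Python's `10 ** k` with k ≥ 0 (k counts loop iterations starting at 0) is exactly (10:Int)^k.toNat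
def digitosIguales_alt (num : Int) : Bool :=
  if num ≤ 0 then true
  else num * 9 == (PySem.Int.mod num 10) * ((10 : Int) ^ (digitosIgualesCountB num 0).toNat - 1)

-- ===== PRECONDITION & SPEC =====
def Spec_digitosIguales (num : Int) (out : Bool) : Prop := out = digitosIguales_alt num
instance (num : Int) (out : Bool) : Decidable (Spec_digitosIguales num out) := by unfold Spec_digitosIguales; infer_instance

-- ===== CLAIM (what is proved, stated in full; the proofs are below) =====
def Claim_equal_digitosIguales : Prop := ∀ (num : Int), Dom_digitosIguales num → Spec_digitosIguales num (digitosIguales num)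

-- ===== LEMMAS AND PROOFS =====

-- the digits of num, low to high (empty for num ≤ 0), proof-only
def pvDigs (num : Int) : List Int :=
  if 0 < num then num % 10 :: pvDigs (num / 10) else []
termination_by num.toNat
decreasing_by omega

-- the digit count of num (0 for num ≤ 0), proof-only
def pvCnt (num : Int) : ℕ :=
  if 0 < num then 1 + pvCnt (num / 10) else 0
termination_by num.toNat
decreasing_by omega

theorem loopA_eq_all (ultimoDig num : Int) (b : Bool) :
    digitosIgualesLoopA ultimoDig num b = (b && (pvDigs num).all (· == ultimoDig)) := by
  fun_induction digitosIgualesLoopA ultimoDig num b with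
  | case1 num b h ih =>
    simp only [dite_eq_ite] at ih
    rw [PySem.Int.floordiv_eq_ediv_of_pos (by norm_num : (0:Int) < 10)] at ih
    rw [pvDigs, if_pos h, PySem.Int.floordiv_eq_ediv_of_pos (by norm_num), ih]
    rw [PySem.Int.mod_eq_emod_of_pos (by norm_num : (0:Int) < 10)]
    by_cases hu : ultimoDig = num % 10
    · simp [hu]
    · have h1 : (num % 10 == ultimoDig) = false :=
        beq_eq_false_iff_ne.mpr (fun h' => hu h'.symm)
      simp [hu, h1]
  | case2 num b h =>
    rw [pvDigs, if_neg h]; simp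

theorem countB_eq (n k : Int) : digitosIgualesCountB n k = k + (pvCnt n : Int) := by
  fun_induction digitosIgualesCountB n k with
  | case1 n k h ih =>
    rw [PySem.Int.floordiv_eq_ediv_of_pos (by norm_num : (0:Int) < 10)] at ih
    rw [pvCnt, if_pos h, PySem.Int.floordiv_eq_ediv_of_pos (by norm_num), ih]
    push_cast
    ring
  | case2 n k h =>
    rw [pvCnt, if_neg h]; simp

-- the heart of the equivalence: all digits of num equal d iff the repunit identity holds
theorem key (K : ℕ) (num : Int) (hK : num.toNat ≤ K) (h : 0 < num)
    (d : Int) (hd0 : 0 ≤ d) (hd9 : d < 10) :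
    (((pvDigs num).all (· == d)) = true ↔ num * 9 = d * ((10 : Int) ^ pvCnt num - 1)) := by
  induction K generalizing num with
  | zero => omega
  | succ K ih =>
    rw [pvDigs, if_pos h, pvCnt, if_pos h]
    set q := num / 10 with hq
    set r := num % 10 with hr
    have hdec : num = 10 * q + r := by omega
    have hr0 : 0 ≤ r := by omega
    have hr9 : r < 10 := by omega
    have hq0 : 0 ≤ q := by positivity
    rw [pow_add, pow_one]
    by_cases hqz : 0 < q
    · -- multi-digit case
      have hqK : q.toNat ≤ K := by omega
      have htail := ih q hqK hqz
      set P := (10 : Int) ^ pvCnt q with hP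
      have hP1 : 1 ≤ P := one_le_pow₀ (by norm_num)
      simp only [List.all_cons, Bool.and_eq_true, beq_iff_eq]
      by_cases hrd : r = d
      · subst hrd
        simp only [hdec, htail, true_and]
        constructor
        · intro hEq
          have hM : q * 9 = r * P - r := by linarith [hEq]
          nlinarith [hM]
        · intro hEq
          nlinarith [hEq]
      · constructor
        · rintro ⟨h1, _⟩; exact absurd h1 hrd
        · intro hEq
          exfalso
          -- mod-10 forces r = d
          have : (10 * q + r) * 9 = d * (10 * P - 1) := by rw [← hdec]; exact hEq
          have h10 : 90 * q + 9 * r + d = 10 * (d * P) := by ring_nf; ring_nf at this; linarith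
          omega
    · -- single-digit case: q = 0, num = r
      have hq0' : q = 0 := by omega
      have : pvDigs q = [] := by rw [pvDigs, if_neg hqz]
      have hc : pvCnt q = 0 := by rw [pvCnt, if_neg hqz]
      rw [this, hc]
      simp only [List.all_cons, List.all_nil, Bool.and_true, beq_iff_eq]
      rw [pow_zero]
      constructor
      · intro h1; omega
      · intro h1; omega

-- ===== VERDICT (by name: the statement is the Claim_ definition above) =====
theorem digitosIguales_spec : Claim_equal_digitosIguales := by
  intro num _
  unfold Spec_digitosIguales digitosIguales digitosIguales_alt
  by_cases h : num ≤ 0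
  · rw [digitosIgualesLoopA, if_neg (by omega), if_pos h]
  · have hpos : 0 < num := by omega
    rw [if_neg h, loopA_eq_all, Bool.true_and, countB_eq]
    have hc : ((0 : Int) + (pvCnt num : Int)).toNat = pvCnt num := by omega
    rw [hc]
    rw [PySem.Int.mod_eq_emod_of_pos (by norm_num : (0:Int) < 10)]
    have hd0 : 0 ≤ num % 10 := Int.emod_nonneg _ (by norm_num)
    have hd9 : num % 10 < 10 := Int.emod_lt_of_pos _ (by norm_num)
    have := key num.toNat num le_rfl hpos (num % 10) hd0 hd9
    rw [Bool.eq_iff_iff, beq_iff_eq]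
    exact this
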